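-- pv_equiv track=rewrite | github.com/keller00/aoc2021 | day25/part1.py | do_east_move
-- ===== SOURCE A (Python) =====
-- Board = list[list[str]]
--
-- def do_east_move(
--         board: Board,
--         new_board: Board | None = None,
-- ) -> tuple[Board, int]:
--     moved = 0
--     if new_board is None:
--         new_board = [["." for _ in recreate_line]
--                      for recreate_line in board]
--     width = len(board[0])
--     for y, move_line in enumerate(board):
--         for x, cell in enumerate(move_line):
--             if cell == ">":
--                 new_x = x + 1
--                 if new_x == width:
--                     new_x = 0
--                 if board[y][new_x] == ".":
--                     new_board[y][new_x] = ">"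
--                     moved += 1
--                 else:
--                     new_board[y][x] = cell
--             elif cell != ".":
--                 new_board[y][x] = cell
--     return new_board, moved
-- ===== SOURCE B (Python) =====
-- # Gather-style rewrite: each output cell is computed from the original board
-- # (stay / arrival / copy / keep-base), and the moved count is a separate
-- # comprehension counting the movers; builds a fresh board instead of mutating
-- # new_board in place (A mutates it; the return value is the same).
-- def do_east_move(board, new_board=None):
--     width = len(board[0])
--
--     def new_cell(row, base, x):
--         cell = row[x]
--         if cell == ">":
--             return ">" if row[(x + 1) % width] != "." else base[x]
--         if cell == ".":
--             return ">" if row[(x + width - 1) % width] == ">" else base[x]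
--         return cell
--
--     bases = new_board if new_board is not None else [["."] * len(r) for r in board]
--     out = [[new_cell(row, base, x) for x in range(len(row))]
--            for row, base in zip(board, bases)]
--     moved = sum(1 for row in board for x in range(len(row))
--                 if row[x] == ">" and row[(x + 1) % width] == ".")
--     return out, moved
-- ===== Notes on version B (the rewrite author's own statement) =====
-- stated objective: alternative
-- what changed: A scatters: it walks the board mutating new_board at destination cells and counts as it writes; B gathers: each output cell is computed independently from the original board (stay/arrival/copy/keep-base) by comprehensions over fresh rows, and the moved count is a separate one-pass count of movers.
-- outside the precondition, e.g. on do_east_move([[]], [[], ['.']]): A returns ([[], ['.']], 0), B returns ([[]], 0)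
import Mathlib
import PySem

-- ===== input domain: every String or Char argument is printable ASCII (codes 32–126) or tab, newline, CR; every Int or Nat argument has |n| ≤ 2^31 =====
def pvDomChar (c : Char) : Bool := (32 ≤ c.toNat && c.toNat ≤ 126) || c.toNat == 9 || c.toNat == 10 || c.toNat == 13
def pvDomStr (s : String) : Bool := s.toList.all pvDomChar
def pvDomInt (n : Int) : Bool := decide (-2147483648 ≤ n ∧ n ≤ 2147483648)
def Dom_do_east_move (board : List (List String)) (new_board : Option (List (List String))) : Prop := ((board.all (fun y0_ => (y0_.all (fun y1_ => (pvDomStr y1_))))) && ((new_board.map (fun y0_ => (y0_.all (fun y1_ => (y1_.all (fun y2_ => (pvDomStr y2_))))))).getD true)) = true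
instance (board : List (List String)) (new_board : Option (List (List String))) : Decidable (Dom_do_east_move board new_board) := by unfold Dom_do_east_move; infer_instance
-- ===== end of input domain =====

-- B is a gather-style (output-driven) rewrite of A's scatter loop; same return value on Pre_;
-- note: Python A mutates a supplied new_board in place, B builds a fresh board — the claim is about the return value.

-- ===== PORT A =====
-- board[y][x] read (indices are natural numbers, in range under Pre_)
def pvGet2 (b : List (List String)) (y x : Nat) : String := (b.getD y []).getD x ""
-- new_board[y][x] = v  (in range under Pre_)
def pvSet2 (b : List (List String)) (y x : Nat) (v : String) : List (List String) :=
  b.set y ((b.getD y []).set x v)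

-- inner 'for x, cell in enumerate(move_line)' loop of A
def pvInnerA (board : List (List String)) (width y : Nat) :
    List String → Nat → List (List String) × Int → List (List String) × Int
  | [], _, st => st
  | cell :: rest, x, st =>
      pvInnerA board width y rest (x + 1)
        (if cell = ">" then
          -- nx = x+1, wrapped to 0 at the right edge
          if pvGet2 board y (if x + 1 = width then 0 else x + 1) = "." then
            (pvSet2 st.1 y (if x + 1 = width then 0 else x + 1) ">", st.2 + 1)
          else (pvSet2 st.1 y x cell, st.2)
        else if cell = "." then st
        else (pvSet2 st.1 y x cell, st.2))

-- outer 'for y, move_line in enumerate(board)' loop of A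
def pvOuterA (board : List (List String)) (width : Nat) :
    List (List String) → Nat → List (List String) × Int → List (List String) × Int
  | [], _, st => st
  | row :: rest, y, st => pvOuterA board width rest (y + 1) (pvInnerA board width y row 0 st)

def do_east_move (board : List (List String)) (new_board : Option (List (List String))) :
    List (List String) × Int :=
  let nb0 := match new_board with
    | none => board.map (fun row => row.map (fun _ => "."))
    | some nb => nb
  let width := (board.getD 0 []).length
  pvOuterA board width board 0 (nb0, 0)

-- ===== PORT B =====
-- new_cell(row, base, x) of Source B
def pvNewCell (width : Nat) (row base : List String) (x : Nat) : String :=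
  if row.getD x "" = ">" then
    (if row.getD ((x + 1) % width) "" ≠ "." then ">" else base.getD x "")
  else if row.getD x "" = "." then
    (if row.getD ((x + width - 1) % width) "" = ">" then ">" else base.getD x "")
  else row.getD x ""

-- the mover predicate of Source B's 'moved' comprehension
def pvMoverB (width : Nat) (row : List String) (x : Nat) : Bool :=
  row.getD x "" == ">" && row.getD ((x + 1) % width) "" == "."

def do_east_move_alt (board : List (List String)) (new_board : Option (List (List String))) :
    List (List String) × Int :=
  let width := (board.getD 0 []).length
  let bases := match new_board with
    | none => board.map (fun r => r.map (fun _ => "."))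
    | some nb => nb
  let out := (board.zip bases).map
    (fun rb => (List.range rb.1.length).map (pvNewCell width rb.1 rb.2))
  let moved : Int :=
    (board.map (fun row => ((((List.range row.length).filter (pvMoverB width row)).length : Nat) : Int))).sum
  (out, moved)

-- ===== PRECONDITION & SPEC =====
-- Pre_ restricts to the function's natural domain: a nonempty rectangular board with a same-shape
-- new_board (when supplied).  A raises IndexError on the empty board and on most ragged/mis-shaped
-- inputs; on some ragged boards A happens to return, but the wrap index there (0 only at column
-- width-1 of row 0's width) is an accident of its implementation and B's modular wrap differs.
def Pre_do_east_move (board : List (List String)) (new_board : Option (List (List String))) : Prop :=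
  board ≠ [] ∧
  (∀ row ∈ board, row.length = (board.getD 0 []).length) ∧
  (∀ nbv ∈ new_board.toList,
     nbv.length = board.length ∧ ∀ r ∈ nbv, r.length = (board.getD 0 []).length)
instance (board : List (List String)) (new_board : Option (List (List String))) : Decidable (Pre_do_east_move board new_board) := by unfold Pre_do_east_move; infer_instance

def pvWitness_do_east_move : List (List String) × Option (List (List String)) :=
  ([[">", "."], [".", "v"]], none)

def Spec_do_east_move (board : List (List String)) (new_board : Option (List (List String))) (out : List (List String) × Int) : Prop := out = do_east_move_alt board new_board
instance (board : List (List String)) (new_board : Option (List (List String))) (out : List (List String) × Int) : Decidable (Spec_do_east_move board new_board out) := by unfold Spec_do_east_move; infer_instance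

-- ===== CLAIM (what is proved, stated in full; the proofs are below) =====
def Claim_equal_do_east_move : Prop := ∀ (board : List (List String)) (new_board : Option (List (List String))), Dom_do_east_move board new_board → Pre_do_east_move board new_board → Spec_do_east_move board new_board (do_east_move board new_board)

-- ===== LEMMAS AND PROOFS =====

-- snapshot A's inner loop on the single row it touches
def pvInnerRow (full : List String) (w : Nat) :
    List String → Nat → List String × Int → List String × Int
  | [], _, st => st
  | cell :: rest, x, st =>
      pvInnerRow full w rest (x + 1)
        (if cell = ">" then
          if full.getD (if x + 1 = w then 0 else x + 1) "" = "." then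
            (st.1.set (if x + 1 = w then 0 else x + 1) ">", st.2 + 1)
          else (st.1.set x cell, st.2)
        else if cell = "." then st
        else (st.1.set x cell, st.2))

-- the value at column i after A has processed columns < j of a row (no-wrap version)
def pvNwVal (w : Nat) (row b : List String) (i : Nat) : String :=
  if row.getD i "" = ">" then
    (if row.getD (if i + 1 = w then 0 else i + 1) "" ≠ "." then ">" else b.getD i "")
  else if row.getD i "" = "." then
    (if 1 ≤ i ∧ row.getD (i - 1) "" = ">" then ">" else b.getD i "")
  else row.getD i ""

def pvStateVal (w : Nat) (row b : List String) (j i : Nat) : String :=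
  if j = w then pvNewCell w row b i
  else if i = j then
    (if row.getD j "" = "." ∧ 1 ≤ j ∧ row.getD (j - 1) "" = ">" then ">" else b.getD j "")
  else if i < j then pvNwVal w row b i
  else b.getD i ""

def pvStateL (w : Nat) (row b : List String) (j : Nat) : List String :=
  (List.range w).map (pvStateVal w row b j)

-- small list utilities ------------------------------------------------------
theorem pv_set_getD_self {α : Type} (l : List α) (y : Nat) (d : α) (h : y < l.length) :
    l.set y (l.getD y d) = l := by
  apply List.ext_getElem (by simp)
  intro i h1 h2
  rw [List.getElem_set]
  rcases eq_or_ne y i with rfl | hne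
  · simp [List.getD_eq_getElem?_getD, List.getElem?_eq_getElem h]
  · simp [hne]

theorem pv_getD_set_self {α : Type} (l : List α) (y : Nat) (r : α) (d : α) (h : y < l.length) :
    (l.set y r).getD y d = r := by
  simp [List.getD_eq_getElem?_getD, h]

theorem pv_set_append_cons {α : Type} (pre : List α) (b : α) (t : List α) (r : α) :
    (pre ++ b :: t).set pre.length r = pre ++ r :: t := by
  induction pre with
  | nil => simp
  | cons a l ih => simp [ih]

theorem pv_getD_append_cons {α : Type} (pre : List α) (b : α) (t : List α) (d : α) :
    (pre ++ b :: t).getD pre.length d = b := by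
  induction pre with
  | nil => simp
  | cons a l ih => simpa using ih

theorem pv_getD_of_drop {α : Type} (l : List α) (n : Nat) (a : α) (t : List α) (d : α)
    (h : l.drop n = a :: t) : l.getD n d = a := by
  have : l[n]? = some a := by
    rw [← List.head?_drop, h]; rfl
  simp [List.getD_eq_getElem?_getD, this]

theorem pv_drop_succ_of_drop {α : Type} (l : List α) (n : Nat) (a : α) (t : List α)
    (h : l.drop n = a :: t) : l.drop (n + 1) = t := by
  rw [← List.tail_drop, h]; rfl

theorem pv_map_range_getD {α : Type} (l : List α) (d : α) :
    (List.range l.length).map (fun i => l.getD i d) = l := by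
  apply List.ext_getElem (by simp)
  intro i h1 h2
  simp [List.getD_eq_getElem?_getD, List.getElem?_eq_getElem h2]

theorem pv_set_map_range {α : Type} (w t : Nat) (f : Nat → α) (v : α) (ht : t < w) :
    ((List.range w).map f).set t v = (List.range w).map (fun i => if i = t then v else f i) := by
  apply List.ext_getElem (by simp)
  intro i h1 h2
  rw [List.getElem_set]
  rcases eq_or_ne i t with rfl | hne
  · simp
  · simp_all [Ne.symm hne]

theorem pv_range_drop_cons (w j : Nat) (h : j < w) :
    (List.range w).drop j = j :: (List.range w).drop (j + 1) := by
  rw [List.drop_eq_getElem_cons (by simpa using h)]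
  simp

-- mod facts -----------------------------------------------------------------
theorem pv_mod_succ (i w : Nat) (h : i < w) :
    (i + 1) % w = if i + 1 = w then 0 else i + 1 := by
  rcases eq_or_ne (i + 1) w with he | hne
  · rw [if_pos he, he, Nat.mod_self]
  · rw [if_neg hne]; exact Nat.mod_eq_of_lt (by omega)

theorem pv_mod_pred (i w : Nat) (h1 : 1 ≤ i) (h2 : i < w) :
    (i + w - 1) % w = i - 1 := by
  have : i + w - 1 = (i - 1) + w := by omega
  rw [this, Nat.add_mod_right]
  exact Nat.mod_eq_of_lt (by omega)

theorem pv_mod_pred_zero (w : Nat) (h : 0 < w) : (0 + w - 1) % w = w - 1 := by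
  simp [Nat.mod_eq_of_lt (by omega : w - 1 < w)]

-- pvNwVal agrees with pvNewCell away from the wrap column -------------------
theorem pv_nw_eq_newCell (w : Nat) (row b : List String) (i : Nat)
    (hi : i < w) (hwrap : 1 ≤ i ∨ row.getD i "" ≠ "." ∨ row.getD (w - 1) "" ≠ ">") :
    pvNwVal w row b i = pvNewCell w row b i := by
  unfold pvNwVal pvNewCell
  rw [pv_mod_succ i w hi]
  rcases Nat.eq_zero_or_pos i with h0 | h1
  · subst h0
    rw [pv_mod_pred_zero w (by omega)]
    rcases hwrap with h | h | h
    · exact absurd h (by omega)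
    · split_ifs <;> simp_all
    · split_ifs <;> simp_all
  · rw [pv_mod_pred i w h1 hi]
    split_ifs <;> simp_all

-- inner loop of A touches only row y ----------------------------------------
theorem pv_innerA_eq (board : List (List String)) (w y : Nat) :
    ∀ (cells : List String) (x : Nat) (nb : List (List String)) (m : Int),
    y < nb.length →
    pvInnerA board w y cells x (nb, m) =
      ((nb.set y (pvInnerRow (board.getD y []) w cells x (nb.getD y [], m)).1),
       (pvInnerRow (board.getD y []) w cells x (nb.getD y [], m)).2) := by
  intro cells
  induction cells with
  | nil =>
      intro x nb m h
      simp only [pvInnerA, pvInnerRow]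
      rw [pv_set_getD_self nb y [] h]
  | cons cell rest ih =>
      intro x nb m h
      have key : ∀ (t : Nat) (v : String) (m' : Int),
          pvInnerA board w y rest (x + 1) (pvSet2 nb y t v, m') =
            (nb.set y (pvInnerRow (board.getD y []) w rest (x + 1)
               ((nb.getD y []).set t v, m')).1,
             (pvInnerRow (board.getD y []) w rest (x + 1)
               ((nb.getD y []).set t v, m')).2) := by
        intro t v m'
        rw [ih (x + 1) (pvSet2 nb y t v) m' (by simpa [pvSet2] using h)]
        simp only [pvSet2]
        rw [pv_getD_set_self nb y _ [] h, List.set_set]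
      rw [pvInnerA, pvInnerRow]
      simp only [pvGet2]
      by_cases h1 : cell = ">"
      · by_cases h2 : (board.getD y []).getD (if x + 1 = w then 0 else x + 1) "" = "."
        · simp only [if_pos h1, if_pos h2]
          exact key _ _ _
        · simp only [if_pos h1, if_neg h2]
          exact key _ _ _
      · by_cases h3 : cell = "."
        · simp only [if_neg h1, if_pos h3]
          exact ih (x + 1) nb m h
        · simp only [if_neg h1, if_neg h3]
          exact key _ _ _

-- moved is threaded additively ----------------------------------------------
theorem pv_innerRow_add (full : List String) (w : Nat) :
    ∀ (cells : List String) (x : Nat) (r : List String) (m : Int),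
    pvInnerRow full w cells x (r, m) =
      ((pvInnerRow full w cells x (r, 0)).1, m + (pvInnerRow full w cells x (r, 0)).2) := by
  intro cells
  induction cells with
  | nil => intro x r m; simp [pvInnerRow]
  | cons cell rest ih =>
      intro x r m
      rw [pvInnerRow, pvInnerRow]
      dsimp only
      by_cases h1 : cell = ">"
      · by_cases h2 : full.getD (if x + 1 = w then 0 else x + 1) "" = "."
        · simp only [if_pos h1, if_pos h2]
          rw [ih (x + 1) _ (m + 1), ih (x + 1) _ (0 + 1)]
          simp only [Prod.mk.injEq]
          exact ⟨by trivial, by omega⟩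
        · simp only [if_pos h1, if_neg h2]
          exact ih (x + 1) _ m
      · by_cases h3 : cell = "."
        · simp only [if_neg h1, if_pos h3]
          exact ih (x + 1) _ m
        · simp only [if_neg h1, if_neg h3]
          exact ih (x + 1) _ m

-- per-column step lemmas for the single-row invariant -----------------------
theorem pv_step_move (w j : Nat) (row b : List String) (hj : j < w)
    (hc : row.getD j "" = ">") (hd : row.getD (if j + 1 = w then 0 else j + 1) "" = ".")
    (i : Nat) (hi : i < w) :
    (if i = (if j + 1 = w then 0 else j + 1) then ">" else pvStateVal w row b j i)
      = pvStateVal w row b (j + 1) i := by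
  have hjne : j ≠ w := by omega
  by_cases hjw : j + 1 = w
  · rw [if_pos hjw] at hd ⊢
    have hwj : w - 1 = j := by omega
    unfold pvStateVal
    rw [if_neg hjne, if_pos hjw]
    rcases eq_or_ne i 0 with rfl | hi0
    · rw [if_pos rfl]
      unfold pvNewCell
      rw [pv_mod_pred_zero w (by omega), hwj, hc, hd]
      simp
    · rw [if_neg hi0]
      rcases eq_or_ne i j with rfl | hnej
      · rw [if_pos rfl]
        unfold pvNewCell
        rw [pv_mod_succ i w hj, if_pos hjw, hc, hd]
        simp
      · rw [if_neg hnej, if_pos (by omega)]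
        exact pv_nw_eq_newCell w row b i hi (Or.inl (by omega))
  · rw [if_neg hjw] at hd ⊢
    unfold pvStateVal
    rw [if_neg hjne, if_neg (show ¬ j + 1 = w from hjw)]
    rcases eq_or_ne i (j + 1) with heq | hne1
    · subst heq
      have hcond : row.getD (j + 1) "" = "." ∧ 1 ≤ j + 1 ∧ row.getD (j + 1 - 1) "" = ">" :=
        ⟨hd, by omega, by simpa using hc⟩
      rw [if_pos rfl, if_pos hcond]
      simp
    · rw [if_neg hne1, if_neg hne1]
      rcases eq_or_ne i j with heq | hnej
      · subst heq
        rw [if_pos rfl]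
        have hpend : ¬ (row.getD i "" = "." ∧ 1 ≤ i ∧ row.getD (i - 1) "" = ">") := by
          rw [hc]; simp
        rw [if_neg hpend, if_pos (show i < i + 1 by omega)]
        unfold pvNwVal
        rw [if_neg hjw, hc, hd]
        simp
      · rw [if_neg hnej]
        by_cases hlt : i < j
        · rw [if_pos hlt, if_pos (by omega)]
        · rw [if_neg hlt, if_neg (by omega)]

theorem pv_step_stay (w j : Nat) (row b : List String) (hj : j < w)
    (hc : row.getD j "" = ">") (hd : ¬ row.getD (if j + 1 = w then 0 else j + 1) "" = ".")
    (i : Nat) (hi : i < w) :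
    (if i = j then ">" else pvStateVal w row b j i) = pvStateVal w row b (j + 1) i := by
  have hjne : j ≠ w := by omega
  by_cases hjw : j + 1 = w
  · rw [if_pos hjw] at hd
    unfold pvStateVal
    rw [if_neg hjne, if_pos hjw]
    rcases eq_or_ne i j with heq | hnej
    · subst heq
      rw [if_pos rfl]
      unfold pvNewCell
      rw [pv_mod_succ i w hj, if_pos hjw, hc, if_pos hd]
      simp
    · rw [if_neg hnej, if_neg hnej]
      by_cases hlt : i < j
      · rw [if_pos hlt]
        refine pv_nw_eq_newCell w row b i hi ?_
        rcases Nat.eq_zero_or_pos i with rfl | h1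
        · exact Or.inr (Or.inl hd)
        · exact Or.inl h1
      · exact absurd trivial (by omega)
  · rw [if_neg hjw] at hd
    unfold pvStateVal
    rw [if_neg hjne, if_neg (show ¬ j + 1 = w from hjw)]
    rcases eq_or_ne i (j + 1) with heq | hne1
    · subst heq
      rw [if_neg (show ¬ j + 1 = j by omega), if_neg (show ¬ j + 1 = j by omega),
        if_neg (show ¬ j + 1 < j by omega), if_pos rfl,
        if_neg (show ¬ (row.getD (j + 1) "" = "." ∧ 1 ≤ j + 1 ∧ row.getD (j + 1 - 1) "" = ">") by
          rintro ⟨h1, -, -⟩; exact hd h1)]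
    · rw [if_neg hne1]
      rcases eq_or_ne i j with heq | hnej
      · subst heq
        rw [if_pos rfl, if_pos (show i < i + 1 by omega)]
        unfold pvNwVal
        rw [if_neg hjw, hc, if_pos hd]
        simp
      · rw [if_neg hnej, if_neg hnej]
        by_cases hlt : i < j
        · rw [if_pos hlt, if_pos (by omega)]
        · rw [if_neg hlt, if_neg (by omega)]

theorem pv_step_dot (w j : Nat) (row b : List String) (hj : j < w)
    (hc : row.getD j "" = ".") (i : Nat) (hi : i < w) :
    pvStateVal w row b j i = pvStateVal w row b (j + 1) i := by
  have hjne : j ≠ w := by omega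
  by_cases hjw : j + 1 = w
  · have hwj : w - 1 = j := by omega
    unfold pvStateVal
    rw [if_neg hjne, if_pos hjw]
    rcases eq_or_ne i j with heq | hnej
    · subst heq
      rw [if_pos rfl]
      unfold pvNewCell
      rw [hc]
      rcases Nat.eq_zero_or_pos i with rfl | h1
      · rw [pv_mod_pred_zero w (by omega), hwj, hc]
        simp
      · rw [pv_mod_pred i w h1 hj, if_neg (show ¬ (("." : String) = ">") by decide), if_pos rfl]
        by_cases hrr : row.getD (i - 1) "" = ">"
        · rw [if_pos hrr, if_pos ⟨rfl, h1, hrr⟩]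
        · rw [if_neg hrr, if_neg (by rintro ⟨-, -, h⟩; exact hrr h)]

    · rw [if_neg hnej]
      by_cases hlt : i < j
      · rw [if_pos hlt]
        refine pv_nw_eq_newCell w row b i hi ?_
        refine Or.inr (Or.inr ?_)
        rw [hwj, hc]
        decide
      · exact absurd trivial (by omega)
  · unfold pvStateVal
    rw [if_neg hjne, if_neg (show ¬ j + 1 = w from hjw)]
    rcases eq_or_ne i (j + 1) with heq | hne1
    · subst heq
      rw [if_neg (show ¬ j + 1 = j by omega), if_neg (show ¬ j + 1 < j by omega), if_pos rfl,
        if_neg (show ¬ (row.getD (j + 1) "" = "." ∧ 1 ≤ j + 1 ∧ row.getD (j + 1 - 1) "" = ">") by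
          rintro ⟨-, -, h3⟩
          rw [Nat.add_sub_cancel, hc] at h3
          exact absurd h3 (by decide))]
    · rw [if_neg hne1]
      rcases eq_or_ne i j with heq | hnej
      · subst heq
        rw [if_pos rfl, if_pos (show i < i + 1 by omega)]
        unfold pvNwVal
        rw [hc]
        simp
      · rw [if_neg hnej]
        by_cases hlt : i < j
        · rw [if_pos hlt, if_pos (by omega)]
        · rw [if_neg hlt, if_neg (by omega)]

theorem pv_step_other (w j : Nat) (row b : List String) (hj : j < w)
    (hc1 : ¬ row.getD j "" = ">") (hc2 : ¬ row.getD j "" = ".") (i : Nat) (hi : i < w) :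
    (if i = j then row.getD j "" else pvStateVal w row b j i) = pvStateVal w row b (j + 1) i := by
  have hjne : j ≠ w := by omega
  by_cases hjw : j + 1 = w
  · have hwj : w - 1 = j := by omega
    unfold pvStateVal
    rw [if_neg hjne, if_pos hjw]
    rcases eq_or_ne i j with heq | hnej
    · subst heq
      rw [if_pos rfl]
      unfold pvNewCell
      rw [if_neg hc1, if_neg hc2]
    · rw [if_neg hnej, if_neg hnej]
      by_cases hlt : i < j
      · rw [if_pos hlt]
        refine pv_nw_eq_newCell w row b i hi (Or.inr (Or.inr ?_))
        rw [hwj]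
        exact hc1
      · exact absurd trivial (by omega)
  · unfold pvStateVal
    rw [if_neg hjne, if_neg (show ¬ j + 1 = w from hjw)]
    rcases eq_or_ne i (j + 1) with heq | hne1
    · subst heq
      rw [if_neg (show ¬ j + 1 = j by omega), if_neg (show ¬ j + 1 = j by omega),
        if_neg (show ¬ j + 1 < j by omega), if_pos rfl,
        if_neg (show ¬ (row.getD (j + 1) "" = "." ∧ 1 ≤ j + 1 ∧ row.getD (j + 1 - 1) "" = ">") by
          rintro ⟨-, -, h3⟩
          rw [Nat.add_sub_cancel] at h3
          exact hc1 h3)]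
    · rw [if_neg hne1]
      rcases eq_or_ne i j with heq | hnej
      · subst heq
        rw [if_pos rfl, if_pos (show i < i + 1 by omega)]
        unfold pvNwVal
        rw [if_neg hc1, if_neg hc2]
      · rw [if_neg hnej, if_neg hnej]
        by_cases hlt : i < j
        · rw [if_pos hlt, if_pos (by omega)]
        · rw [if_neg hlt, if_neg (by omega)]

theorem pv_innerRow_inv (w : Nat) (row b : List String) :
    ∀ (cells : List String) (j : Nat) (m : Int), j + cells.length = w → row.drop j = cells →
    pvInnerRow row w cells j (pvStateL w row b j, m) =
      (pvStateL w row b w,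
       m + ((((List.range w).drop j).countP (pvMoverB w row) : Nat) : Int)) := by
  intro cells
  induction cells with
  | nil =>
      intro j m hlen hdrop
      have hj : j = w := by simpa using hlen
      rw [pvInnerRow, hj]
      rw [show (List.range w).drop w = [] from by simp]
      simp
  | cons c rest ih =>
      intro j m hlen hdrop
      have hj : j < w := by simp at hlen; omega
      have hcell : row.getD j "" = c := pv_getD_of_drop row j c rest "" hdrop
      have hdrop' : row.drop (j + 1) = rest := pv_drop_succ_of_drop row j c rest hdrop
      have hcnt : ((List.range w).drop j).countP (pvMoverB w row) =
          ((List.range w).drop (j + 1)).countP (pvMoverB w row)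
            + (if pvMoverB w row j = true then 1 else 0) := by
        rw [pv_range_drop_cons w j hj, List.countP_cons]
      rw [pvInnerRow]
      dsimp only
      by_cases h1 : c = ">"
      · subst h1
        by_cases h2 : row.getD (if j + 1 = w then 0 else j + 1) "" = "."
        · rw [if_pos rfl, if_pos h2]
          have hnx : (if j + 1 = w then 0 else j + 1) < w := by split <;> omega
          have hstate : (pvStateL w row b j).set (if j + 1 = w then 0 else j + 1) ">"
              = pvStateL w row b (j + 1) := by
            rw [pvStateL, pv_set_map_range w _ _ _ hnx]
            apply List.map_congr_left
            intro i hi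
            exact pv_step_move w j row b hj hcell h2 i (List.mem_range.mp hi)
          rw [hstate, ih (j + 1) (m + 1) (by simp at hlen ⊢; omega) hdrop']
          have hpj : pvMoverB w row j = true := by
            unfold pvMoverB
            rw [hcell, pv_mod_succ j w hj, h2]
            rfl
          rw [hcnt, hpj]
          simp only [Prod.mk.injEq, true_and, if_pos]
          push_cast
          omega
        · rw [if_pos rfl, if_neg h2]
          have hstate : (pvStateL w row b j).set j ">" = pvStateL w row b (j + 1) := by
            rw [pvStateL, pv_set_map_range w _ _ _ hj]
            apply List.map_congr_left
            intro i hi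
            exact pv_step_stay w j row b hj hcell h2 i (List.mem_range.mp hi)
          rw [hstate, ih (j + 1) m (by simp at hlen ⊢; omega) hdrop']
          have hpj : pvMoverB w row j = false := by
            unfold pvMoverB
            rw [hcell, pv_mod_succ j w hj]
            simpa using h2
          rw [hcnt, hpj]
          simp
      · by_cases h3 : c = "."
        · subst h3
          rw [if_neg (by exact h1), if_pos rfl]
          have hstate : pvStateL w row b j = pvStateL w row b (j + 1) := by
            unfold pvStateL
            apply List.map_congr_left
            intro i hi
            exact pv_step_dot w j row b hj hcell i (List.mem_range.mp hi)
          rw [hstate, ih (j + 1) m (by simp at hlen ⊢; omega) hdrop']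
          have hpj : pvMoverB w row j = false := by
            unfold pvMoverB
            rw [hcell]
            simp
          rw [hcnt, hpj]
          simp
        · rw [if_neg h1, if_neg h3]
          have hstate : (pvStateL w row b j).set j c = pvStateL w row b (j + 1) := by
            rw [pvStateL, pv_set_map_range w _ _ _ hj]
            apply List.map_congr_left
            intro i hi
            rw [show c = row.getD j "" from hcell.symm]
            exact pv_step_other w j row b hj (by rw [hcell]; exact h1) (by rw [hcell]; exact h3)
              i (List.mem_range.mp hi)
          rw [hstate, ih (j + 1) m (by simp at hlen ⊢; omega) hdrop']
          have hpj : pvMoverB w row j = false := by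
            unfold pvMoverB
            rw [hcell]
            simp [h1]
          rw [hcnt, hpj]
          simp

-- start state is the base row -------------------------------------------------
theorem pv_stateL_zero (w : Nat) (row b : List String) (hb : b.length = w) :
    pvStateL w row b 0 = b := by
  subst hb
  unfold pvStateL
  rw [show ((List.range b.length).map (pvStateVal b.length row b 0)) =
      (List.range b.length).map (fun i => b.getD i "") from ?_, pv_map_range_getD]
  apply List.map_congr_left
  intro i hi
  simp only [List.mem_range] at hi
  unfold pvStateVal
  split_ifs <;> simp_all <;> omega

-- outer loop -----------------------------------------------------------------
theorem pv_outerA_eq (board : List (List String)) (w : Nat) :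
    ∀ (rows bs pre : List (List String)) (m : Int),
    board.drop pre.length = rows → bs.length = rows.length →
    pvOuterA board w rows pre.length (pre ++ bs, m) =
      (pre ++ (rows.zip bs).map (fun p => (pvInnerRow p.1 w p.1 0 (p.2, 0)).1),
       m + ((rows.zip bs).map (fun p => (pvInnerRow p.1 w p.1 0 (p.2, 0)).2)).sum) := by
  intro rows
  induction rows with
  | nil =>
      intro bs pre m hdrop hlen
      have : bs = [] := List.eq_nil_of_length_eq_zero hlen
      subst this
      simp [pvOuterA]
  | cons row rest ih =>
      intro bs pre m hdrop hlen
      match bs with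
      | [] => simp at hlen
      | b :: bs' =>
        rw [pvOuterA]
        have hy : pre.length < (pre ++ b :: bs').length := by simp
        rw [pv_innerA_eq board w pre.length row 0 (pre ++ b :: bs') m hy]
        rw [pv_getD_append_cons, pv_getD_of_drop board pre.length row rest [] hdrop]
        rw [pv_innerRow_add row w row 0 b m]
        rw [pv_set_append_cons]
        have hpre' : (pre ++ [(pvInnerRow row w row 0 (b, 0)).1]).length = pre.length + 1 := by
          simp
        have hdrop' : board.drop (pre ++ [(pvInnerRow row w row 0 (b, 0)).1]).length = rest := by
          rw [hpre']; exact pv_drop_succ_of_drop board pre.length row rest hdrop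
        have := ih bs' (pre ++ [(pvInnerRow row w row 0 (b, 0)).1])
          (m + (pvInnerRow row w row 0 (b, 0)).2) hdrop' (by simpa using hlen)
        rw [show pre ++ (pvInnerRow row w row 0 (b, 0)).1 :: bs' =
          (pre ++ [(pvInnerRow row w row 0 (b, 0)).1]) ++ bs' by simp] at *
        rw [hpre'] at this
        rw [this]
        simp [List.zip_cons_cons]
        omega

-- final snapshot of a processed row is B's gathered row ----------------------
theorem pv_stateL_w (w : Nat) (row b : List String) :
    pvStateL w row b w = (List.range w).map (pvNewCell w row b) := by
  unfold pvStateL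
  apply List.map_congr_left
  intro i hi
  unfold pvStateVal
  rw [if_pos rfl]

theorem pv_rowResult (w : Nat) (row bb : List String) (hr : row.length = w)
    (hb : bb.length = w) :
    pvInnerRow row w row 0 (bb, 0) =
      ((List.range row.length).map (pvNewCell w row bb),
       ((((List.range row.length).filter (pvMoverB w row)).length : Nat) : Int)) := by
  have h0 := pv_innerRow_inv w row bb row 0 0 (by omega) (by simp)
  rw [pv_stateL_zero w row bb hb] at h0
  rw [h0, pv_stateL_w, hr]
  simp [List.countP_eq_length_filter]

theorem pv_core (board nb0 : List (List String))
    (hrows : ∀ row ∈ board, row.length = (board.getD 0 []).length)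
    (hlen0 : nb0.length = board.length)
    (hb0 : ∀ r ∈ nb0, r.length = (board.getD 0 []).length) :
    pvOuterA board (board.getD 0 []).length board 0 (nb0, 0) =
      ((board.zip nb0).map
         (fun rb => (List.range rb.1.length).map (pvNewCell (board.getD 0 []).length rb.1 rb.2)),
       (board.map (fun row =>
         ((((List.range row.length).filter (pvMoverB (board.getD 0 []).length row)).length : Nat) : Int))).sum) := by
  have h := pv_outerA_eq board (board.getD 0 []).length board nb0 [] 0 (by simp) (by rw [hlen0])
  simp only [List.length_nil, List.nil_append] at h
  rw [h]
  congr 1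
  · apply List.map_congr_left
    intro p hp
    obtain ⟨h1, h2⟩ := List.of_mem_zip hp
    rw [pv_rowResult (board.getD 0 []).length p.1 p.2 (hrows _ h1) (hb0 _ h2)]
  · rw [show (board.zip nb0).map (fun p => (pvInnerRow p.1 (board.getD 0 []).length p.1 0 (p.2, 0)).2)
        = (board.zip nb0).map (fun p =>
            ((((List.range p.1.length).filter (pvMoverB (board.getD 0 []).length p.1)).length : Nat) : Int)) from by
      apply List.map_congr_left
      intro p hp
      obtain ⟨h1, h2⟩ := List.of_mem_zip hp
      rw [pv_rowResult (board.getD 0 []).length p.1 p.2 (hrows _ h1) (hb0 _ h2)]]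
    rw [show (board.zip nb0).map (fun p =>
          ((((List.range p.1.length).filter (pvMoverB (board.getD 0 []).length p.1)).length : Nat) : Int))
        = (board.zip nb0).map ((fun row =>
            ((((List.range row.length).filter (pvMoverB (board.getD 0 []).length row)).length : Nat) : Int)) ∘ Prod.fst) from rfl]
    rw [← List.map_map, List.map_fst_zip (by omega)]
    omega

-- ===== VERDICT (by name: the statement is the Claim_ definition above) =====
theorem do_east_move_spec : Claim_equal_do_east_move := by
  unfold Claim_equal_do_east_move
  intro board nb hdom hpre
  unfold Spec_do_east_move
  obtain ⟨hne, hrows, hnbp⟩ := hpre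
  unfold do_east_move do_east_move_alt
  cases nb with
  | none =>
      dsimp only
      rw [pv_core board (board.map (fun row => row.map (fun _ => "."))) hrows (by simp)
        (by intro r hr
            simp only [List.mem_map] at hr
            obtain ⟨row, hrow, rfl⟩ := hr
            simpa using hrows row hrow)]
  | some v =>
      dsimp only
      obtain ⟨hv1, hv2⟩ := hnbp v (by simp)
      rw [pv_core board v hrows hv1 hv2]
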